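-- pv_equiv track=rewrite | github.com/Anto-Rishath008/clinical-note-summarization | src/core.py | get_blocked_tokens
-- ===== SOURCE A (Python) =====
-- def get_blocked_tokens(tokens, n):
--     """
--     Get tokens that would create repeating n-grams.
--
--     Args:
--         tokens: list of token IDs
--         n: n-gram size
--
--     Returns:
--         set of blocked token IDs
--     """
--     if len(tokens) < n - 1:
--         return set()
--
--     # Get last n-1 tokens
--     prefix = tuple(tokens[-(n-1):])
--
--     # Find all n-grams in sequence
--     blocked = set()
--     for i in range(len(tokens) - n + 1):
--         ngram = tuple(tokens[i:i+n])
--         if ngram[:-1] == prefix: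
--             blocked.add(ngram[-1])
--
--     return blocked
-- ===== SOURCE B (Python) =====
-- def get_blocked_tokens(tokens, n):
--     """
--     Get tokens that would create repeating n-grams.
--
--     Candidate-pruning rewrite: instead of re-slicing an n-gram at every
--     position, keep the list of candidate start positions and prune it one
--     pattern element at a time; survivors are exactly the occurrences of the
--     last (n-1)-gram, and the token after each survivor is blocked.
--     """
--     m = n - 1
--     L = len(tokens)
--     if m < 1 or L < n:
--         return set()
--     prefix = tokens[L - m:]
--     positions = list(range(L - m))
--     for j in range(m):
--         if not positions:
--             break
--         p = prefix[j]
--         positions = [i for i in positions if tokens[i + j] == p]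
--     return {tokens[i + m] for i in positions}
-- ===== Notes on version B (the rewrite author's own statement) =====
-- stated objective: alternative
-- what changed: Replaced the per-position n-gram re-slicing and tuple comparison by a candidate-pruning scan: the list of start positions is filtered once per pattern element of the last (n-1)-gram (stopping when no candidates survive), and the token following each surviving position is collected.
-- outside the precondition, e.g. on get_blocked_tokens([5, 7, 5], -1): A returns {7}, B returns set(); on get_blocked_tokens([1, 2, 3], 0): A returns set(), B returns set()
import Mathlib
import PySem

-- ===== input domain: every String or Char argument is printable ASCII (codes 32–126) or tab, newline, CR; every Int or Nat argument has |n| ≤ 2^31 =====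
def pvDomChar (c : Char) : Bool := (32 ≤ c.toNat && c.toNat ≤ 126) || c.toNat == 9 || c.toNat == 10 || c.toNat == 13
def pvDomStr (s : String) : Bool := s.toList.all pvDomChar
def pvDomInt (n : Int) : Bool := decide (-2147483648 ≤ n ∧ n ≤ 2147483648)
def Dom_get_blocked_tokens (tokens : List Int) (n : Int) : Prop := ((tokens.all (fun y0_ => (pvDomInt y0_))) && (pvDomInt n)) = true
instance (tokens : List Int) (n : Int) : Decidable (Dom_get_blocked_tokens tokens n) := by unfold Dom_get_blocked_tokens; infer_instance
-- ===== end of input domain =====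

-- B replaces A's per-position n-gram slicing/comparison by pruning a candidate-position
-- list once per pattern element (an alternative algorithm with the same worst-case cost).

-- ===== PORT A =====
def get_blocked_tokens (tokens : List Int) (n : Int) : List Int :=
  if PySem.List.len tokens < n - 1 then []
  else
    let pfx := PySem.List.slice tokens (some (-(n - 1))) none
    (PySem.List.pyRange 0 (PySem.List.len tokens - n + 1) 1).foldl
      (fun blocked i =>
        let ngram := PySem.List.slice tokens (some i) (some (i + n))
        if PySem.List.slice ngram none (some (-1)) = pfx then
          -- ngram[-1]: in range for every input admitted by Pre_ (ngram nonempty there)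
          PySem.Set.add blocked ((PySem.List.pyGet? ngram (-1)).getD 0)
        else blocked) []

-- ===== PORT B =====
def get_blocked_tokens_alt (tokens : List Int) (n : Int) : List Int :=
  let m := n - 1
  let L := PySem.List.len tokens
  if m < 1 || L < n then []
  else
    let pfx := PySem.List.slice tokens (some (L - m)) none
    -- 'for j in range(m): if not positions: break; …' — the break is ported as the
    -- isEmpty guard (skipping the remaining iterations is the identity on []).
    let positions := (PySem.List.pyRange 0 m 1).foldl
      (fun ps j =>
        if ps.isEmpty then ps
        else
          let p := PySem.List.pyGetD pfx j 0
          ps.filter (fun i => PySem.List.pyGetD tokens (i + j) 0 == p))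
      (PySem.List.pyRange 0 (L - m) 1)
    PySem.Set.ofList (positions.map (fun i => PySem.List.pyGetD tokens (i + m) 0))

-- ===== PRECONDITION & SPEC =====
-- Pre_ excludes n ≤ 0, outside the natural domain of an n-gram size: there A either raises
-- IndexError (when tokens.length + n ≤ 1) or returns a value shaped by Python's
-- negative-slice wraparound; B returns the empty set on all such inputs.
def Pre_get_blocked_tokens (tokens : List Int) (n : Int) : Prop := 1 ≤ n
instance (tokens : List Int) (n : Int) : Decidable (Pre_get_blocked_tokens tokens n) := by unfold Pre_get_blocked_tokens; infer_instance
def pvWitness_get_blocked_tokens : List Int × Int := ([1, 2, 1], 2)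

def Spec_get_blocked_tokens (tokens : List Int) (n : Int) (out : List Int) : Prop := out = get_blocked_tokens_alt tokens n
instance (tokens : List Int) (n : Int) (out : List Int) : Decidable (Spec_get_blocked_tokens tokens n out) := by unfold Spec_get_blocked_tokens; infer_instance

-- ===== CLAIM (what is proved, stated in full; the proofs are below) =====
def Claim_equal_get_blocked_tokens : Prop := ∀ (tokens : List Int) (n : Int), Dom_get_blocked_tokens tokens n → Pre_get_blocked_tokens tokens n → Spec_get_blocked_tokens tokens n (get_blocked_tokens tokens n)


-- ===== LEMMAS AND PROOFS =====

-- A's conditional-add loop is the Set of the mapped filtered list.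
theorem pv_foldl_add_if {α : Type} (l : List α) (c : α → Prop) [DecidablePred c] (f : α → Int) :
    l.foldl (fun b i => if c i then PySem.Set.add b (f i) else b) ([] : List Int)
      = PySem.Set.ofList ((l.filter (fun i => decide (c i))).map f) := by
  rw [← PySem.Set.update_nil_left, PySem.Set.update_map_eq_foldl_add, List.foldl_filter]
  simp

-- equality of two length-m windows of tokens, elementwise
theorem pv_window (tokens : List Int) (mN iN : Nat) (h : iN + mN ≤ tokens.length) :
    ((tokens.drop iN).take mN = tokens.drop (tokens.length - mN))
      ↔ ∀ j < mN, tokens.getD (iN + j) 0 = (tokens.drop (tokens.length - mN)).getD j 0 := by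
  have hR : (tokens.drop (tokens.length - mN)).length = mN := by
    rw [List.length_drop]; omega
  have hT : ((tokens.drop iN).take mN).length = mN := by
    rw [List.length_take, List.length_drop]; omega
  constructor
  · intro he j hj
    have := congrArg (fun l => l.getD j 0) he
    simpa [List.getD_eq_getElem?_getD, List.getElem?_take_of_lt hj, List.getElem?_drop] using this
  · intro hp
    apply List.ext_getElem (by omega)
    intro j h1 h2
    have := hp j (by omega)
    simp only [List.getD_eq_getElem?_getD, List.getElem?_drop] at this
    rw [List.getElem_take, List.getElem_drop]
    rw [List.getElem?_eq_getElem (by omega), List.getElem?_eq_getElem (by omega)] at this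
    simpa using this

-- B's pruning loop (with the break guard) is one filter by the conjunction.
theorem pv_foldl_filter (k : Nat) (q : Int → Nat → Bool) (ps : List Int) :
    (List.range k).foldl (fun ps j => ps.filter (fun i => q i j)) ps
      = ps.filter (fun i => (List.range k).all (fun j => q i j)) := by
  induction k generalizing ps with
  | zero => simp
  | succ k ih =>
    rw [List.range_succ, List.foldl_append, ih]
    simp [List.filter_filter, List.all_append, Bool.and_comm]

theorem get_blocked_tokens_spec : Claim_equal_get_blocked_tokens := by
  intro tokens n _ hpre
  unfold Pre_get_blocked_tokens at hpre
  unfold Spec_get_blocked_tokens get_blocked_tokens get_blocked_tokens_alt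
  simp only [PySem.List.len_eq]
  obtain ⟨nN, rfl⟩ : ∃ nN : Nat, n = (nN : Int) := ⟨n.toNat, by omega⟩
  have hn1 : 1 ≤ nN := by exact_mod_cast hpre
  split_ifs with h1 h2 h2
  · rfl
  · exfalso; simp only [Bool.or_eq_true, decide_eq_true_eq] at h2; push Not at h2; omega
  · -- A's loop yields []: either n = 1 (no position matches) or the range is empty
    simp only [Bool.or_eq_true, decide_eq_true_eq] at h2
    by_cases hone : nN = 1
    · subst hone
      rw [show ((tokens.length : Int) - ((1 : Nat) : Int) + 1) = ((tokens.length : Nat) : Int) by omega,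
          PySem.List.pyRange_zero_nat]
      rw [pv_foldl_add_if]
      rw [List.filter_eq_nil_iff.mpr ?_]
      · simp
      · rintro i hi
        simp only [List.mem_map, List.mem_range] at hi
        obtain ⟨iN, hiN, rfl⟩ := hi
        simp only [decide_eq_true_eq]
        intro he
        have hlen := congrArg List.length he
        rw [show ((iN : Int) + ((1 : Nat) : Int)) = ((iN + 1 : Nat) : Int) by push_cast; ring] at hlen
        rw [PySem.List.slice_natCast, PySem.List.slice_to_neg_one] at hlen
        simp only [List.length_dropLast, List.length_take, List.length_drop,
          Nat.add_sub_cancel_left] at hlen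
        rw [show (-(((1 : Nat) : Int) - 1)) = ((0 : Nat) : Int) by norm_num,
            PySem.List.slice_from_natCast, List.drop_zero] at hlen
        omega
    · have hlen : (tokens.length : Int) = (nN : Int) - 1 := by
        rcases h2 with h2 | h2 <;> omega
      rw [show ((tokens.length : Int) - (nN : Int) + 1) = ((0 : Nat) : Int) by omega,
          PySem.List.pyRange_zero_nat]
      simp
  · -- main case: 2 ≤ nN ≤ tokens.length
    simp only [Bool.or_eq_true, decide_eq_true_eq] at h2; push Not at h2
    have hn2 : 2 ≤ nN := by omega
    have hnL : nN ≤ tokens.length := by exact_mod_cast h2.2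
    -- normalise the prefix and the position range on both sides
    rw [show (-((nN : Int) - 1)) = -(((nN - 1 : Nat) : Nat) : Int) by push_cast [hn1]; ring]
    rw [PySem.List.slice_from_neg_natCast _ _ (by omega)]
    rw [show ((tokens.length : Int) - (nN : Int) + 1)
          = ((tokens.length - (nN - 1) : Nat) : Int) by omega]
    rw [show ((tokens.length : Int) - ((nN : Int) - 1))
          = ((tokens.length - (nN - 1) : Nat) : Int) by omega]
    rw [PySem.List.slice_from_natCast]
    rw [show ((nN : Int) - 1) = ((nN - 1 : Nat) : Int) by omega]
    rw [PySem.List.pyRange_zero_nat, PySem.List.pyRange_zero_nat, List.foldl_map, List.foldl_map]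
    rw [show (fun (ps : List Int) (j : Nat) =>
          if ps.isEmpty then ps
          else ps.filter (fun i =>
            PySem.List.pyGetD tokens (i + ((j : Nat) : Int)) 0
              == PySem.List.pyGetD (tokens.drop (tokens.length - (nN - 1))) ((j : Nat) : Int) 0))
        = (fun (ps : List Int) (j : Nat) =>
            ps.filter (fun i =>
              PySem.List.pyGetD tokens (i + ((j : Nat) : Int)) 0
                == PySem.List.pyGetD (tokens.drop (tokens.length - (nN - 1))) ((j : Nat) : Int) 0))
        from funext fun ps => funext fun j => by cases ps <;> simp]
    rw [pv_foldl_filter, pv_foldl_add_if, List.filter_map, List.map_map]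
    congr 1
    rw [List.filter_congr ?_]
    · apply List.map_congr_left
      intro iN hi
      rw [List.mem_filter, List.mem_range] at hi
      have hiN : iN < tokens.length - (nN - 1) := hi.1
      simp only [Function.comp_apply]
      rw [show ((iN : Int) + (nN : Int)) = ((iN + nN : Nat) : Int) by push_cast; ring]
      rw [PySem.List.slice_natCast, PySem.List.pyGet?_neg_one]
      rw [show ((iN : Int) + ((nN - 1 : Nat) : Int)) = ((iN + (nN - 1) : Nat) : Int) by omega]
      rw [PySem.List.pyGetD_natCast]
      rw [List.getLast?_eq_getElem?]
      rw [List.length_take, List.length_drop, Nat.add_sub_cancel_left]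
      have hmin : min nN (tokens.length - iN) = nN := by omega
      rw [hmin]
      rw [List.getElem?_take_of_lt (by omega), List.getElem?_drop]
      rw [List.getElem?_eq_getElem (by omega)]
      rw [List.getD_eq_getElem?_getD, List.getElem?_eq_getElem (by omega)]
    · intro iN hi
      rw [List.mem_range] at hi
      simp only [Function.comp_apply]
      rw [Bool.eq_iff_iff, decide_eq_true_eq, List.all_eq_true]
      rw [show ((iN : Int) + (nN : Int)) = ((iN + nN : Nat) : Int) by push_cast; ring]
      rw [PySem.List.slice_natCast, PySem.List.slice_to_neg_one, Nat.add_sub_cancel_left]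
      rw [List.dropLast_eq_take, List.length_take, List.length_drop]
      rw [show min nN (tokens.length - iN) - 1 = nN - 1 by omega, List.take_take]
      rw [show min (nN - 1) nN = nN - 1 by omega]
      rw [pv_window tokens (nN - 1) iN (by omega)]
      constructor
      · intro hp j hj
        rw [List.mem_range] at hj
        have := hp j hj
        rw [show ((iN : Int) + (j : Int)) = ((iN + j : Nat) : Int) by push_cast; ring]
        simp only [PySem.List.pyGetD_natCast, beq_iff_eq]
        exact this
      · intro hp j hj
        have := hp j (List.mem_range.mpr hj)
        rw [show ((iN : Int) + (j : Int)) = ((iN + j : Nat) : Int) by push_cast; ring] at this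
        simp only [PySem.List.pyGetD_natCast, beq_iff_eq] at this
        exact this
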